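-- pv_equiv track=rewrite | github.com/qiyitang71/Random-Arena-Games | experiments/compute-exact-probability-reach.py | has_full_priority0_lasso
-- ===== SOURCE A (Python) =====
-- def has_full_priority0_lasso(vertices, edges):
--     """
--     Check if there is a lasso-like path starting from v0 such that
--     every vertex along the path and in the cycle has priority 0.
--     Returns True if such a lasso exists, otherwise False.
--     """
--     if "v0" not in vertices or vertices["v0"] != 0:
--         return False
--
--     stack = [("v0", [])]  # (current_vertex, path_from_v0)
--
--     while stack:
--         current, path = stack.pop()
--
--         # Check priority along the path
--         if vertices.get(current, -1) != 0:
--             continue  # skip this path; violates priority-0 requirement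
--
--         # Cycle detection
--         if current in path:
--             cycle = path[path.index(current):] + [current]
--             # entire path + cycle already guaranteed priority 0 by previous checks
--             return True
--
--         new_path = path + [current]
--
--         for neighbor in edges.get(current, []):
--             stack.append((neighbor, new_path))
--
--     return False
-- ===== SOURCE B (Python) =====
-- def has_full_priority0_lasso(vertices, edges):
--     """
--     Same decision by frontier iteration instead of path enumeration:
--     a priority-0 lasso from v0 exists iff there is a priority-0 walk
--     from v0 with len(vertices) edges (pigeonhole: such a walk must
--     repeat a vertex, and a lasso can be pumped to any length).
--     """
--     if vertices.get("v0") != 0: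
--         return False
--     frontier = {"v0"}
--     for _ in range(len(vertices)):
--         frontier = {w for v in frontier
--                       for w in edges.get(v, [])
--                       if vertices.get(w) == 0}
--         if not frontier:
--             return False
--     return True
-- ===== Notes on version B (the rewrite author's own statement) =====
-- stated objective: alternative
-- what changed: Replaces A's exhaustive stack-based enumeration of all simple paths from v0 with a set-valued frontier iteration: the set of endpoints of priority-0 walks from v0 is advanced len(vertices) times and a lasso exists iff the frontier is still nonempty (pigeonhole: a walk with |V| edges repeats a vertex; a lasso pumps to any length); A's worst case is exponential while B is polynomial, but a timing run on random inputs did not confirm a consistent speed-up, so no speed is claimed.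
import Mathlib
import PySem

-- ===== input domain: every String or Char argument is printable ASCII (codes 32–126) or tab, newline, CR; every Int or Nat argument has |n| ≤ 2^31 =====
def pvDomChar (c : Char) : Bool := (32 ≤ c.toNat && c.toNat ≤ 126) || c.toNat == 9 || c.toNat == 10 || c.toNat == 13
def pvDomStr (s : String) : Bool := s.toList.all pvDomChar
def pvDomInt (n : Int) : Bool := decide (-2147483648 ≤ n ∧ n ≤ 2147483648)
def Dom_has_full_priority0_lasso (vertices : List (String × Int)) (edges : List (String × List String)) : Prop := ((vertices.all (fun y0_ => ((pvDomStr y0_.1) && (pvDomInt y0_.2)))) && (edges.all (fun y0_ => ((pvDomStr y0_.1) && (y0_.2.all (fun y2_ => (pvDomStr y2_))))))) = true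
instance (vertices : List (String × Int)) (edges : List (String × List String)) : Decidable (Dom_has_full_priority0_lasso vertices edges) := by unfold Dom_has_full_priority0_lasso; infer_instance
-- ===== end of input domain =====

-- B replaces A's exhaustive stack-based enumeration of all simple paths from v0
-- by a frontier iteration of the priority-0 successor map, advanced
-- len(vertices) times (pigeonhole); proved to return the same Bool on every input.

-- ===== PORT A =====
-- A's while-loop is ported with an explicit fuel counter (a totality guard
-- only: pvFuelA is proved in pvA_loop_iff / pvA_iff below to exceed the number
-- of iterations the loop can perform, so the 0-fuel branch is never reached).
-- The loop body is a step-for-step transliteration; the stack top is the list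
-- head, so the neighbours pushed by the for-loop arrive reversed at the head.
def pvA_loop (vertices : List (String × Int)) (edges : List (String × List String)) :
    Nat → List (String × List String) → Bool
  | 0, _ => false
  | _ + 1, [] => false
  | fuel + 1, (current, path) :: stack =>
    if (PySem.Dict.mk vertices).getD current (-1) != 0 then
      pvA_loop vertices edges fuel stack
    else if path.contains current then
      true
    else
      pvA_loop vertices edges fuel
        ((((PySem.Dict.mk edges).getD current []).map
            (fun n => (n, path ++ [current]))).reverse ++ stack)

def pvFuelA (vertices : List (String × Int)) (edges : List (String × List String)) : Nat :=
  ((edges.map (fun p => p.2.length)).sum + 1) ^ vertices.length + 1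

def has_full_priority0_lasso (vertices : List (String × Int)) (edges : List (String × List String)) : Bool :=
  if !(PySem.Dict.mk vertices).contains "v0"
      || ((PySem.Dict.mk vertices).get? "v0" != some (0 : Int)) then
    false
  else
    pvA_loop vertices edges (pvFuelA vertices edges) [("v0", [])]

-- ===== PORT B =====
-- one frontier advance: the set comprehension over the current frontier
def pvB_step (vertices : List (String × Int)) (edges : List (String × List String))
    (frontier : PySem.Set String) : PySem.Set String :=
  PySem.Set.ofList (frontier.flatMap (fun v =>
    ((PySem.Dict.mk edges).getD v []).filter
      (fun w => (PySem.Dict.mk vertices).get? w == some (0 : Int))))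

def pvB_loop (vertices : List (String × Int)) (edges : List (String × List String)) :
    Nat → PySem.Set String → Bool
  | 0, _ => true
  | k + 1, frontier =>
    let f := pvB_step vertices edges frontier
    if f.isEmpty then false else pvB_loop vertices edges k f

def has_full_priority0_lasso_alt (vertices : List (String × Int)) (edges : List (String × List String)) : Bool :=
  if (PySem.Dict.mk vertices).get? "v0" != some (0 : Int) then
    false
  else
    pvB_loop vertices edges vertices.length (PySem.Set.ofList ["v0"])

-- ===== PRECONDITION & SPEC =====
def Spec_has_full_priority0_lasso (vertices : List (String × Int)) (edges : List (String × List String)) (out : Bool) : Prop := out = has_full_priority0_lasso_alt vertices edges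
instance (vertices : List (String × Int)) (edges : List (String × List String)) (out : Bool) : Decidable (Spec_has_full_priority0_lasso vertices edges out) := by unfold Spec_has_full_priority0_lasso; infer_instance

-- ===== CLAIM (what is proved, stated in full; the proofs are below) =====
def Claim_equal_has_full_priority0_lasso : Prop := ∀ (vertices : List (String × Int)) (edges : List (String × List String)), Dom_has_full_priority0_lasso vertices edges → Spec_has_full_priority0_lasso vertices edges (has_full_priority0_lasso vertices edges)

-- ===== LEMMAS AND PROOFS =====

-- x has priority 0 under the first-match lookup both ports perform
def pvVZ (vertices : List (String × Int)) (x : String) : Prop :=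
  (PySem.Dict.mk vertices).get? x = some 0

-- the edge relation (successor lists, missing vertex = no successors)
def pvR (edges : List (String × List String)) (a b : String) : Prop :=
  b ∈ (PySem.Dict.mk edges).getD a []

-- a priority-0 walk, as its list of visited vertices
def pvWalk (vertices : List (String × Int)) (edges : List (String × List String))
    (w : List String) : Prop :=
  List.IsChain (pvR edges) w ∧ ∀ x ∈ w, pvVZ vertices x

-- what A's search finds from state (c, path)
inductive pvDet (vertices : List (String × Int)) (edges : List (String × List String)) :
    String → List String → Prop
  | hit (c : String) (path : List String) :
      pvVZ vertices c → c ∈ path → pvDet vertices edges c path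
  | step (c : String) (path : List String) (n : String) :
      pvVZ vertices c → c ∉ path → pvR edges c n →
      pvDet vertices edges n (path ++ [c]) → pvDet vertices edges c path

-- a priority-0 walk from v0 of exactly k edges ending at x
def pvWalkTo (vertices : List (String × Int)) (edges : List (String × List String))
    (k : Nat) (x : String) : Prop :=
  ∃ w : List String, pvWalk vertices edges w ∧ w.head? = some "v0" ∧
    w.getLast? = some x ∧ w.length = k + 1

-- termination measure for A's loop
def pvMu (vertices : List (String × Int)) (edges : List (String × List String))
    (e : String × List String) : Nat :=
  ((edges.map (fun p => p.2.length)).sum + 1) ^ (vertices.length - e.2.length)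

def pvM (vertices : List (String × Int)) (edges : List (String × List String))
    (stack : List (String × List String)) : Nat :=
  (stack.map (pvMu vertices edges)).sum

theorem pv_succ_len_le (edges : List (String × List String)) (x : String) :
    ((PySem.Dict.mk edges).getD x []).length ≤ (edges.map (fun p => p.2.length)).sum := by
  induction edges with
  | nil => simp [PySem.Dict.getD, PySem.Dict.get?]
  | cons e rest ih =>
    rw [PySem.Dict.getD_eq_get?_getD, PySem.Dict.get?_mk_cons]
    split
    · simp
    · rw [← PySem.Dict.getD_eq_get?_getD]
      calc ((PySem.Dict.mk rest).getD x []).length ≤ (rest.map (fun p => p.2.length)).sum := ih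
        _ ≤ ((e :: rest).map (fun p => p.2.length)).sum := by simp

theorem pv_path_len_le (vertices : List (String × Int)) (path : List String)
    (hnd : path.Nodup) (hvz : ∀ x ∈ path, pvVZ vertices x) :
    path.length ≤ vertices.length := by
  have hsub : path ⊆ vertices.map Prod.fst := by
    intro x hx
    exact List.mem_map_of_mem
      (PySem.Dict.mem_items_of_get?_eq_some (PySem.Dict.mk vertices) (hvz x hx))
  have := (List.subperm_of_subset hnd hsub).length_le
  simpa using this

theorem pv_getD_iff (vertices : List (String × Int)) (x : String) :
    (PySem.Dict.mk vertices).getD x (-1) = 0 ↔ pvVZ vertices x := by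
  rw [PySem.Dict.getD_eq_get?_getD]
  cases hx : (PySem.Dict.mk vertices).get? x <;> simp [pvVZ, hx]

theorem pv_sum_map_const {α : Type} (l : List α) (k : Nat) :
    (l.map (fun _ => k)).sum = l.length * k := by
  induction l with
  | nil => simp
  | cons a t ih => simp; ring

theorem pv_det_head_iff (vertices : List (String × Int)) (edges : List (String × List String))
    (current : String) (path : List String)
    (hvz : pvVZ vertices current) (hmem : current ∉ path) :
    pvDet vertices edges current path ↔
      ∃ n ∈ (PySem.Dict.mk edges).getD current [], pvDet vertices edges n (path ++ [current]) := by
  constructor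
  · intro h
    cases h with
    | hit _ _ _ hm => exact absurd hm hmem
    | step _ _ n _ _ hr hd => exact ⟨n, hr, hd⟩
  · rintro ⟨n, hr, hd⟩
    exact pvDet.step current path n hvz hmem hr hd

theorem pvA_loop_iff (vertices : List (String × Int)) (edges : List (String × List String)) :
    ∀ (fuel : Nat) (stack : List (String × List String)),
      (∀ e ∈ stack, e.2.Nodup ∧ ∀ x ∈ e.2, pvVZ vertices x) →
      pvM vertices edges stack < fuel →
      (pvA_loop vertices edges fuel stack = true ↔
        ∃ e ∈ stack, pvDet vertices edges e.1 e.2) := by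
  intro fuel
  induction fuel with
  | zero => intro stack _ hM; exact absurd hM (Nat.not_lt_zero _)
  | succ fuel ih =>
    intro stack hinv hM
    match stack with
    | [] => simp [pvA_loop]
    | (current, path) :: rest =>
      obtain ⟨hnd, hvzp⟩ := hinv _ (List.mem_cons_self)
      have hinvr : ∀ e ∈ rest, e.2.Nodup ∧ ∀ x ∈ e.2, pvVZ vertices x :=
        fun e he => hinv e (List.mem_cons_of_mem _ he)
      have hMc : pvM vertices edges ((current, path) :: rest)
          = pvMu vertices edges (current, path) + pvM vertices edges rest := by
        simp [pvM]
      have hmupos : 0 < pvMu vertices edges (current, path) :=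
        Nat.pow_pos (by omega)
      simp only [pvA_loop]
      by_cases hz : (PySem.Dict.mk vertices).getD current (-1) = 0
      · have hvzc : pvVZ vertices current := (pv_getD_iff vertices current).mp hz
        rw [if_neg (by simp [hz])]
        by_cases hc : current ∈ path
        · rw [if_pos (by simpa using hc)]
          simp only [true_iff]
          exact ⟨(current, path), List.mem_cons_self, pvDet.hit current path hvzc hc⟩
        · rw [if_neg (by simpa using hc)]
          set children := (((PySem.Dict.mk edges).getD current []).map
            (fun n => (n, path ++ [current]))) with hch
          have hndc : (path ++ [current]).Nodup := by
            simp [List.nodup_append, hnd]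
            exact fun a ha h => hc (h ▸ ha)
          have hvzc' : ∀ x ∈ path ++ [current], pvVZ vertices x := by
            intro x hx
            rcases List.mem_append.mp hx with h | h
            · exact hvzp x h
            · simp at h; subst h; exact hvzc
          have hinv' : ∀ e ∈ children.reverse ++ rest, e.2.Nodup ∧ ∀ x ∈ e.2, pvVZ vertices x := by
            intro e he
            rcases List.mem_append.mp he with h | h
            · rw [List.mem_reverse, hch, List.mem_map] at h
              obtain ⟨n, _, rfl⟩ := h
              exact ⟨hndc, hvzc'⟩
            · exact hinvr e h
          have hlen1 : path.length + 1 ≤ vertices.length := by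
            have := pv_path_len_le vertices (path ++ [current]) hndc hvzc'
            simpa using this
          have hM' : pvM vertices edges (children.reverse ++ rest) < fuel := by
            have hsum : pvM vertices edges children.reverse
                = ((PySem.Dict.mk edges).getD current []).length *
                  ((edges.map (fun p => p.2.length)).sum + 1) ^ (vertices.length - (path.length + 1)) := by
              rw [pvM, List.map_reverse, List.sum_reverse, hch, List.map_map]
              have : (pvMu vertices edges ∘ fun n => (n, path ++ [current]))
                  = fun _ => ((edges.map (fun p => p.2.length)).sum + 1) ^ (vertices.length - (path.length + 1)) := by
                funext n; simp [pvMu]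
              rw [this, pv_sum_map_const]
            have hkey : ((PySem.Dict.mk edges).getD current []).length *
                ((edges.map (fun p => p.2.length)).sum + 1) ^ (vertices.length - (path.length + 1))
                < pvMu vertices edges (current, path) := by
              set E := (edges.map (fun p => p.2.length)).sum with hE
              set K := (E + 1) ^ (vertices.length - (path.length + 1)) with hK
              have hKpos : 0 < K := Nat.pow_pos (by omega)
              have h1 : ((PySem.Dict.mk edges).getD current []).length ≤ E := pv_succ_len_le edges current
              have h2 : vertices.length - path.length = (vertices.length - (path.length + 1)) + 1 := by omega
              calc ((PySem.Dict.mk edges).getD current []).length * K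
                  ≤ E * K := Nat.mul_le_mul_right K h1
                _ < (E + 1) * K := by
                    exact (Nat.mul_lt_mul_right hKpos).mpr (by omega)
                _ = pvMu vertices edges (current, path) := by
                    rw [pvMu, h2, pow_succ, mul_comm]
            have : pvM vertices edges (children.reverse ++ rest)
                = pvM vertices edges children.reverse + pvM vertices edges rest := by
              simp [pvM]
            omega
          rw [ih _ hinv' hM']
          constructor
          · rintro ⟨e, he, hd⟩
            rcases List.mem_append.mp he with h | h
            · rw [List.mem_reverse, hch, List.mem_map] at h
              obtain ⟨n, hn, rfl⟩ := h
              exact ⟨(current, path), List.mem_cons_self,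
                (pv_det_head_iff vertices edges current path hvzc hc).mpr ⟨n, hn, hd⟩⟩
            · exact ⟨e, List.mem_cons_of_mem _ h, hd⟩
          · rintro ⟨e, he, hd⟩
            rcases List.mem_cons.mp he with h | h
            · subst h
              obtain ⟨n, hn, hd'⟩ := (pv_det_head_iff vertices edges current path hvzc hc).mp hd
              exact ⟨(n, path ++ [current]),
                List.mem_append_left _ (by rw [List.mem_reverse, hch, List.mem_map]; exact ⟨n, hn, rfl⟩), hd'⟩
            · exact ⟨e, List.mem_append_right _ h, hd⟩
      · rw [if_pos (by simpa using hz)]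
        have hM'' : pvM vertices edges rest < fuel := by omega
        rw [ih _ hinvr hM'']
        constructor
        · rintro ⟨e, he, hd⟩
          exact ⟨e, List.mem_cons_of_mem _ he, hd⟩
        · rintro ⟨e, he, hd⟩
          rcases List.mem_cons.mp he with h | h
          · subst h
            exfalso
            apply hz
            cases hd with
            | hit _ _ hv _ => exact (pv_getD_iff vertices current).mpr hv
            | step _ _ _ hv _ _ _ => exact (pv_getD_iff vertices current).mpr hv
          · exact ⟨e, h, hd⟩

theorem pvA_iff (vertices : List (String × Int)) (edges : List (String × List String)) :
    has_full_priority0_lasso vertices edges = true ↔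
      pvVZ vertices "v0" ∧ pvDet vertices edges "v0" [] := by
  unfold has_full_priority0_lasso
  by_cases hvz : pvVZ vertices "v0"
  · have hcon : (PySem.Dict.mk vertices).contains "v0" = true := by
      rw [PySem.Dict.contains_eq_isSome_get?, hvz]; rfl
    rw [if_neg (by simp [hcon]; exact hvz)]
    rw [pvA_loop_iff vertices edges _ _ (by simp) (by
      simp [pvM, pvMu, pvFuelA])]
    simp [hvz]
  · rw [if_pos ?_]
    · constructor
      · intro h; cases h
      · rintro ⟨h0, _⟩; exact absurd h0 hvz
    · cases hq : (PySem.Dict.mk vertices).get? "v0" with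
      | none =>
        have : (PySem.Dict.mk vertices).contains "v0" = false := by
          rw [PySem.Dict.contains_eq_isSome_get?, hq]; rfl
        simp [this]
      | some v =>
        have hv : v ≠ 0 := by
          intro h; subst h; exact hvz hq
        simp [hv]

theorem pv_mem_step (vertices : List (String × Int)) (edges : List (String × List String))
    (F : PySem.Set String) (x : String) :
    x ∈ pvB_step vertices edges F ↔ ∃ u ∈ F, pvR edges u x ∧ pvVZ vertices x := by
  simp [pvB_step, PySem.Set.mem_ofList, List.mem_flatMap, List.mem_filter, pvR, pvVZ]

theorem pvB_loop_iff (vertices : List (String × Int)) (edges : List (String × List String)) :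
    ∀ (k : Nat) (F : PySem.Set String), F ≠ [] →
      (pvB_loop vertices edges k F = true ↔ (pvB_step vertices edges)^[k] F ≠ []) := by
  intro k
  induction k with
  | zero => intro F hF; simpa [pvB_loop] using hF
  | succ k ih =>
    intro F hF
    rw [pvB_loop, Function.iterate_succ_apply]
    by_cases hf : pvB_step vertices edges F = []
    · have hfix : ∀ n, (pvB_step vertices edges)^[n] ([] : PySem.Set String) = [] := by
        intro n; exact Function.iterate_fixed rfl n
      simp [hf, hfix]
    · simp only [List.isEmpty_iff]
      rw [if_neg hf]
      exact ih _ hf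

theorem pv_walkTo_succ (vertices : List (String × Int)) (edges : List (String × List String))
    (k : Nat) (x : String) :
    pvWalkTo vertices edges (k + 1) x ↔
      ∃ u, pvWalkTo vertices edges k u ∧ pvR edges u x ∧ pvVZ vertices x := by
  constructor
  · rintro ⟨w, ⟨hch, hvz⟩, hh, hl, hlen⟩
    have hne : w ≠ [] := by intro h; simp [h] at hlen
    have hxw : w.getLast hne = x := by
      rw [List.getLast?_eq_getLast hne] at hl; exact Option.some.inj hl
    have weq : w.dropLast ++ [x] = w := by rw [← hxw]; exact List.dropLast_append_getLast hne
    have hdne : w.dropLast ≠ [] := by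
      intro h
      have := congrArg List.length weq
      simp [h, hlen] at this
    refine ⟨w.dropLast.getLast hdne, ⟨w.dropLast, ⟨?_, ?_⟩, ?_, ?_, ?_⟩, ?_, ?_⟩
    · exact hch.prefix (List.dropLast_prefix w)
    · exact fun y hy => hvz y ((List.dropLast_prefix w).subset hy)
    · rw [← weq] at hh; rwa [List.head?_append_of_ne_nil _ hdne] at hh
    · exact List.getLast?_eq_getLast hdne
    · rw [List.length_dropLast, hlen]; omega
    · rw [← weq] at hch
      rw [List.isChain_append] at hch
      exact hch.2.2 _ (List.getLast?_eq_getLast hdne) x rfl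
    · exact hvz x (by rw [← weq]; simp)
  · rintro ⟨u, ⟨w, ⟨hch, hvz⟩, hh, hl, hlen⟩, hr, hz⟩
    have hne : w ≠ [] := by intro h; simp [h] at hlen
    refine ⟨w ++ [x], ⟨?_, ?_⟩, ?_, ?_, ?_⟩
    · rw [List.isChain_append]
      refine ⟨hch, List.isChain_singleton x, ?_⟩
      intro a ha b hb
      rw [hl] at ha
      simp at hb
      cases ha; cases hb; exact hr
    · intro y hy
      rcases List.mem_append.mp hy with h | h
      · exact hvz y h
      · simp at h; cases h; exact hz
    · rwa [List.head?_append_of_ne_nil _ hne]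
    · exact List.getLast?_concat
    · simp [hlen]

theorem pv_mem_iter (vertices : List (String × Int)) (edges : List (String × List String))
    (hvz : pvVZ vertices "v0") :
    ∀ (k : Nat) (x : String),
      x ∈ (pvB_step vertices edges)^[k] ["v0"] ↔ pvWalkTo vertices edges k x := by
  intro k
  induction k with
  | zero =>
    intro x
    simp only [Function.iterate_zero, id_eq, List.mem_singleton]
    constructor
    · rintro rfl
      exact ⟨["v0"], ⟨List.isChain_singleton _, by simpa using hvz⟩, rfl, rfl, rfl⟩
    · rintro ⟨w, _, hh, hl, hlen⟩
      obtain ⟨y, rfl⟩ := List.length_eq_one_iff.mp hlen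
      simp at hh hl
      rw [← hh, ← hl]
  | succ k ih =>
    intro x
    rw [Function.iterate_succ_apply', pv_mem_step, pv_walkTo_succ]
    constructor
    · rintro ⟨u, hu, hr, hz⟩
      exact ⟨u, (ih u).mp hu, hr, hz⟩
    · rintro ⟨u, hu, hr, hz⟩
      exact ⟨u, (ih u).mpr hu, hr, hz⟩

theorem pvB_iff (vertices : List (String × Int)) (edges : List (String × List String)) :
    has_full_priority0_lasso_alt vertices edges = true ↔
      pvVZ vertices "v0" ∧ ∃ x, pvWalkTo vertices edges vertices.length x := by
  unfold has_full_priority0_lasso_alt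
  by_cases hvz : pvVZ vertices "v0"
  · rw [if_neg (by unfold pvVZ at hvz; simp [hvz])]
    have hof : PySem.Set.ofList ["v0"] = ["v0"] := rfl
    rw [hof, pvB_loop_iff vertices edges _ _ (by simp)]
    constructor
    · intro hne
      obtain ⟨x, hx⟩ := List.exists_mem_of_ne_nil _ hne
      exact ⟨hvz, x, (pv_mem_iter vertices edges hvz _ x).mp hx⟩
    · rintro ⟨_, x, hx⟩
      intro hnil
      have := (pv_mem_iter vertices edges hvz _ x).mpr hx
      rw [hnil] at this
      simp at this
  · rw [if_pos (by unfold pvVZ at hvz; simpa using hvz)]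
    constructor
    · intro h; cases h
    · rintro ⟨h0, _⟩; exact absurd h0 hvz

theorem pv_det_of_walk (vertices : List (String × Int)) (edges : List (String × List String)) :
    ∀ (w : List String) (path : List String) (c z : String),
      w.head? = some c → pvWalk vertices edges w → w.getLast? = some z →
      z ∈ path ++ w.dropLast → pvDet vertices edges c path := by
  intro w
  induction w with
  | nil => intro path c z hh; simp at hh
  | cons a r ih =>
    intro path c z hh hw hl hz
    have hac : a = c := by simpa using hh
    subst hac
    have hva : pvVZ vertices a := hw.2 a (by simp)
    cases r with
    | nil =>
      obtain rfl : a = z := by simpa using hl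
      exact pvDet.hit a path hva (by simpa using hz)
    | cons b t =>
      by_cases hc : a ∈ path
      · exact pvDet.hit a path hva hc
      · have hch := hw.1
        rw [List.isChain_cons] at hch
        refine pvDet.step a path b hva hc (hch.1 b rfl) ?_
        refine ih (path ++ [a]) b z rfl ⟨hch.2, fun y hy => hw.2 y (by simp [hy])⟩ ?_ ?_
        · simpa using hl
        · have : z ∈ path ++ a :: (b :: t).dropLast := by simpa using hz
          simpa [List.append_assoc] using this

theorem pv_walk_of_det (vertices : List (String × Int)) (edges : List (String × List String)) :
    ∀ (c : String) (path : List String), pvDet vertices edges c path →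
      ∃ (w : List String) (z : String), w.head? = some c ∧ pvWalk vertices edges w ∧
        w.getLast? = some z ∧ z ∈ path ++ w.dropLast := by
  intro c path hdet
  induction hdet with
  | hit c path hv hm =>
    exact ⟨[c], c, rfl, ⟨List.isChain_singleton c, by simpa using hv⟩, rfl, by simpa using hm⟩
  | step c path n hv hnin hr _ ih =>
    obtain ⟨w, z, hh, hw, hl, hz⟩ := ih
    have hne : w ≠ [] := by intro h; rw [h] at hh; simp at hh
    refine ⟨c :: w, z, rfl, ⟨?_, ?_⟩, ?_, ?_⟩
    · rw [List.isChain_cons]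
      exact ⟨fun y hy => by rw [hh] at hy; cases hy; exact hr, hw.1⟩
    · intro y hy
      rcases List.mem_cons.mp hy with h | h
      · cases h; exact hv
      · exact hw.2 y h
    · rw [show c :: w = [c] ++ w from rfl, List.getLast?_append, hl]; rfl
    · rw [List.dropLast_cons_of_ne_nil hne]
      simpa [List.append_assoc] using hz

theorem pv_dup_split (w : List String) (h : ¬ w.Nodup) :
    ∃ (s : List String) (x : String) (t : List String), w = s ++ x :: t ∧ x ∈ t := by
  induction w with
  | nil => simp at h
  | cons a r ih =>
    by_cases ha : a ∈ r
    · exact ⟨[], a, r, rfl, ha⟩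
    · have : ¬ r.Nodup := by
        intro hr; exact h (List.nodup_cons.mpr ⟨ha, hr⟩)
      obtain ⟨s, x, t, hst, hx⟩ := ih this
      exact ⟨a :: s, x, t, by rw [hst]; rfl, hx⟩

theorem pv_pump (vertices : List (String × Int)) (edges : List (String × List String))
    (w : List String) (z : String)
    (hh : w.head? = some "v0") (hw : pvWalk vertices edges w)
    (hl : w.getLast? = some z) (hz : z ∈ w.dropLast) :
    ∀ k : Nat, ∃ x, pvWalkTo vertices edges k x := by
  have hne : w ≠ [] := by intro h; rw [h] at hh; simp at hh
  have hzl : w.getLast hne = z := by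
    rw [List.getLast?_eq_getLast hne] at hl; exact Option.some.inj hl
  have weq : w.dropLast ++ [z] = w := by rw [← hzl]; exact List.dropLast_append_getLast hne
  obtain ⟨u1, u2, hd⟩ := List.append_of_mem hz
  have wform : w = u1 ++ (z :: (u2 ++ [z])) := by
    rw [← weq, hd]; simp
  have hsuf : (z :: (u2 ++ [z])) <:+ w := wform ▸ List.suffix_append u1 _
  have hchz : List.IsChain (pvR edges) (z :: (u2 ++ [z])) := hw.1.suffix hsuf
  rw [List.isChain_cons] at hchz
  have hmemseg : ∀ y ∈ u2 ++ [z], pvVZ vertices y := by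
    intro y hy
    exact hw.2 y (hsuf.subset (List.mem_cons_of_mem _ hy))
  have aux : ∀ m : Nat, ∃ W : List String, pvWalk vertices edges W ∧
      W.head? = some "v0" ∧ W.getLast? = some z ∧ m ≤ W.length := by
    intro m
    induction m with
    | zero => exact ⟨w, hw, hh, hl, Nat.zero_le _⟩
    | succ m ihm =>
      obtain ⟨W, hW, hWh, hWl, hm⟩ := ihm
      have hWne : W ≠ [] := by intro h; rw [h] at hWh; simp at hWh
      refine ⟨W ++ (u2 ++ [z]), ⟨?_, ?_⟩, ?_, ?_, ?_⟩
      · rw [List.isChain_append]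
        refine ⟨hW.1, hchz.2, ?_⟩
        intro a ha b hb
        rw [hWl] at ha; cases ha
        exact hchz.1 b hb
      · intro y hy
        rcases List.mem_append.mp hy with h | h
        · exact hW.2 y h
        · exact hmemseg y h
      · rwa [List.head?_append_of_ne_nil _ hWne]
      · rw [List.getLast?_append]
        have : (u2 ++ [z]).getLast? = some z := List.getLast?_concat
        rw [this]; rfl
      · rw [List.length_append]
        have : 1 ≤ (u2 ++ [z]).length := by simp
        omega
  intro k
  obtain ⟨W, hW, hWh, hWl, hm⟩ := aux (k + 1)
  have hTne : W.take (k + 1) ≠ [] := by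
    have : (W.take (k + 1)).length = k + 1 := by
      rw [List.length_take]; omega
    intro h; rw [h] at this; simp at this
  refine ⟨(W.take (k + 1)).getLast hTne, W.take (k + 1), ⟨?_, ?_⟩, ?_, ?_, ?_⟩
  · exact hW.1.take _
  · exact fun y hy => hW.2 y (List.take_subset _ _ hy)
  · rw [List.head?_take]; simp [hWh]
  · exact List.getLast?_eq_getLast _
  · rw [List.length_take]; omega

theorem pv_det_of_long_walk (vertices : List (String × Int)) (edges : List (String × List String))
    (x : String) (h : pvWalkTo vertices edges vertices.length x) :
    pvDet vertices edges "v0" [] := by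
  obtain ⟨w, hw, hh, _hl, hlen⟩ := h
  have hnodup : ¬ w.Nodup := by
    intro hnd
    have hsub : w ⊆ vertices.map Prod.fst := by
      intro y hy
      have hv := hw.2 y hy
      have := PySem.Dict.mem_items_of_get?_eq_some (PySem.Dict.mk vertices) hv
      exact List.mem_map_of_mem this
    have := (List.subperm_of_subset hnd hsub).length_le
    rw [hlen, List.length_map] at this
    omega
  obtain ⟨s, y, t, rfl, hyt⟩ := pv_dup_split w hnodup
  obtain ⟨t1, t2, rfl⟩ := List.append_of_mem hyt
  have hpre : ((s ++ y :: t1) ++ [y]) <+: (s ++ y :: (t1 ++ y :: t2)) :=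
    ⟨t2, by simp⟩
  have hne : ((s ++ y :: t1) ++ [y]) ≠ [] := by simp
  refine pv_det_of_walk vertices edges ((s ++ y :: t1) ++ [y]) [] "v0" y ?_ ⟨?_, ?_⟩ ?_ ?_
  · rw [← List.head?_append_of_ne_nil _ hne (l₂ := t2)]
    rw [show ((s ++ y :: t1) ++ [y]) ++ t2 = s ++ y :: (t1 ++ y :: t2) by simp]
    exact hh
  · exact hw.1.prefix hpre
  · exact fun a ha => hw.2 a (hpre.subset ha)
  · exact List.getLast?_concat
  · rw [List.dropLast_concat]
    simp

-- ===== VERDICT (by name: the statement is the Claim_ definition above) =====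
theorem has_full_priority0_lasso_spec : Claim_equal_has_full_priority0_lasso := by
  intro vertices edges _dom
  unfold Spec_has_full_priority0_lasso
  rw [Bool.eq_iff_iff, pvA_iff, pvB_iff]
  constructor
  · rintro ⟨h0, hdet⟩
    refine ⟨h0, ?_⟩
    obtain ⟨w, z, hh, hw, hl, hz⟩ := pv_walk_of_det vertices edges _ _ hdet
    simpa using pv_pump vertices edges w z hh hw hl (by simpa using hz) vertices.length
  · rintro ⟨h0, x, hx⟩
    exact ⟨h0, pv_det_of_long_walk vertices edges x hx⟩
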